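-- pv_equiv track=rewrite | github.com/Steven11876/SenatorTradingAnalysis | senator.py | find_total_value
-- ===== SOURCE A (Python) =====
-- def find_total_value(adapted_list):
--     """Finds the total value of trades in the list"""
--     value_dict = {}
--     for a in adapted_list:
--         if a["amount"] not in value_dict:
--             value_dict[a["amount"]] = 1
--         else:
--             value_dict[a["amount"]] += 1
--
--     total_value = 0
--     total_value += (value_dict.get("$1,001 - $15,000", 0))*8000 + (value_dict.get("$15,001 - $50,000", 0))*32500 + (value_dict.get("$50,001 - $100,000", 0))*75000 + (value_dict.get("$100,001 - $250,000", 0))*175000 + (value_dict.get("$250,001 - $500,000", 0))*375000 + (value_dict.get("$500,001 - $1,000,000", 0))*750000 + (value_dict.get("$1,000,001 - $5,000,000", 0))*3000000 + (value_dict.get("$5,000,001 - $25,000,000", 0))*15000000 + (value_dict.get("$25,000,001 - $50,000,000", 0))*37500000 + (value_dict.get("Over $50,000,000", 0))*50000000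
--
--     return total_value
-- ===== SOURCE B (Python) =====
-- VALUE_MAP = {
--     "$1,001 - $15,000": 8000,
--     "$15,001 - $50,000": 32500,
--     "$50,001 - $100,000": 75000,
--     "$100,001 - $250,000": 175000,
--     "$250,001 - $500,000": 375000,
--     "$500,001 - $1,000,000": 750000,
--     "$1,000,001 - $5,000,000": 3000000,
--     "$5,000,001 - $25,000,000": 15000000,
--     "$25,000,001 - $50,000,000": 37500000,
--     "Over $50,000,000": 50000000,
-- }
--
-- def find_total_value(adapted_list):
--     """Finds the total value of trades in the list"""
--     total_value = 0
--     for a in adapted_list: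
--         total_value += VALUE_MAP.get(a["amount"], 0)
--     return total_value
-- ===== Notes on version B (the rewrite author's own statement) =====
-- stated objective: simpler
-- what changed: Replaces the count-dictionary pass plus the ten explicit .get()*value terms with a single accumulating pass that looks each trade's amount label up in one constant label-to-value map.
import Mathlib
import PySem

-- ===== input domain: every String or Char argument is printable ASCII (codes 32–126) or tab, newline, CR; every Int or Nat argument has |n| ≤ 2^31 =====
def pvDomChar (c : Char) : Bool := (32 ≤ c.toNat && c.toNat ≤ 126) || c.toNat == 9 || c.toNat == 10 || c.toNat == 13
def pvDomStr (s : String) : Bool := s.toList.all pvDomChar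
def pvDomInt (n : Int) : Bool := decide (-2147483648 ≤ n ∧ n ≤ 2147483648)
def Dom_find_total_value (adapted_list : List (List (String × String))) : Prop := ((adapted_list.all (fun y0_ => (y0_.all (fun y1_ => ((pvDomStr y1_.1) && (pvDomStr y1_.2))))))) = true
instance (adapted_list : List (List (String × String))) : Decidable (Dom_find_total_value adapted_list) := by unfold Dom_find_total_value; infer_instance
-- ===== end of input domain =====

-- B replaces A's count-dictionary pass plus ten explicit lookup*value terms with one
-- accumulating pass over a constant label-to-value map (simpler decomposition, same cost).


-- ===== PORT A =====
-- a["amount"]: first-match lookup in the dict; Pre_ guarantees the key is present,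
-- so the "" default is never observed on admitted inputs (Python raises KeyError there).
def pyAmount (a : List (String × String)) : String :=
  ((PySem.Dict.mk a).get? "amount").getD ""

def find_total_value (adapted_list : List (List (String × String))) : Int :=
  let value_dict := adapted_list.foldl (fun d a =>
    if d.contains (pyAmount a) = false then d.insert (pyAmount a) (1 : Int)
    else d.modify (pyAmount a) 0 (· + 1)) PySem.Dict.empty
  0 + ((value_dict.getD "$1,001 - $15,000" 0) * 8000
    + (value_dict.getD "$15,001 - $50,000" 0) * 32500
    + (value_dict.getD "$50,001 - $100,000" 0) * 75000
    + (value_dict.getD "$100,001 - $250,000" 0) * 175000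
    + (value_dict.getD "$250,001 - $500,000" 0) * 375000
    + (value_dict.getD "$500,001 - $1,000,000" 0) * 750000
    + (value_dict.getD "$1,000,001 - $5,000,000" 0) * 3000000
    + (value_dict.getD "$5,000,001 - $25,000,000" 0) * 15000000
    + (value_dict.getD "$25,000,001 - $50,000,000" 0) * 37500000
    + (value_dict.getD "Over $50,000,000" 0) * 50000000)

-- ===== PORT B =====
def valueMap : PySem.Dict String Int := PySem.Dict.mk
  [("$1,001 - $15,000", 8000),
   ("$15,001 - $50,000", 32500),
   ("$50,001 - $100,000", 75000),
   ("$100,001 - $250,000", 175000),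
   ("$250,001 - $500,000", 375000),
   ("$500,001 - $1,000,000", 750000),
   ("$1,000,001 - $5,000,000", 3000000),
   ("$5,000,001 - $25,000,000", 15000000),
   ("$25,000,001 - $50,000,000", 37500000),
   ("Over $50,000,000", 50000000)]

def find_total_value_alt (adapted_list : List (List (String × String))) : Int :=
  adapted_list.foldl (fun total_value a => total_value + valueMap.getD (pyAmount a) 0) 0

-- ===== PRECONDITION & SPEC =====
-- Pre_ excludes exactly the inputs where some element lacks the "amount" key: Python A raises KeyError there.
def Pre_find_total_value (adapted_list : List (List (String × String))) : Prop :=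
  (adapted_list.all (fun a => (PySem.Dict.mk a).contains "amount")) = true
instance (adapted_list : List (List (String × String))) : Decidable (Pre_find_total_value adapted_list) := by unfold Pre_find_total_value; infer_instance
def pvWitness_find_total_value : (List (List (String × String))) :=
  [[("amount", "$1,001 - $15,000")], [("amount", "unknown")]]
def Spec_find_total_value (adapted_list : List (List (String × String))) (out : Int) : Prop := out = find_total_value_alt adapted_list
instance (adapted_list : List (List (String × String))) (out : Int) : Decidable (Spec_find_total_value adapted_list out) := by unfold Spec_find_total_value; infer_instance

-- ===== CLAIM (what is proved, stated in full; the proofs are below) =====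
def Claim_equal_find_total_value : Prop := ∀ (adapted_list : List (List (String × String))), Dom_find_total_value adapted_list → Pre_find_total_value adapted_list → Spec_find_total_value adapted_list (find_total_value adapted_list)

-- ===== LEMMAS AND PROOFS =====

-- A's ten-term total, as a function of the list of amount labels.
def sumA (l : List String) : Int :=
  (l.count "$1,001 - $15,000" : Int) * 8000
  + (l.count "$15,001 - $50,000" : Int) * 32500
  + (l.count "$50,001 - $100,000" : Int) * 75000
  + (l.count "$100,001 - $250,000" : Int) * 175000
  + (l.count "$250,001 - $500,000" : Int) * 375000
  + (l.count "$500,001 - $1,000,000" : Int) * 750000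
  + (l.count "$1,000,001 - $5,000,000" : Int) * 3000000
  + (l.count "$5,000,001 - $25,000,000" : Int) * 15000000
  + (l.count "$25,000,001 - $50,000,000" : Int) * 37500000
  + (l.count "Over $50,000,000" : Int) * 50000000

-- the one-element contribution of a label k, seen from A's ten ite-terms
theorem hit (k : String) :
    (if k = "$1,001 - $15,000" then (1:Int) else 0) * 8000
    + (if k = "$15,001 - $50,000" then (1:Int) else 0) * 32500
    + (if k = "$50,001 - $100,000" then (1:Int) else 0) * 75000
    + (if k = "$100,001 - $250,000" then (1:Int) else 0) * 175000
    + (if k = "$250,001 - $500,000" then (1:Int) else 0) * 375000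
    + (if k = "$500,001 - $1,000,000" then (1:Int) else 0) * 750000
    + (if k = "$1,000,001 - $5,000,000" then (1:Int) else 0) * 3000000
    + (if k = "$5,000,001 - $25,000,000" then (1:Int) else 0) * 15000000
    + (if k = "$25,000,001 - $50,000,000" then (1:Int) else 0) * 37500000
    + (if k = "Over $50,000,000" then (1:Int) else 0) * 50000000
    = valueMap.getD k 0 := by
  by_cases h1 : k = "$1,001 - $15,000"
  · subst h1; simp [valueMap, PySem.Dict.getD_eq_get?_getD, PySem.Dict.get?_mk_cons]
  by_cases h2 : k = "$15,001 - $50,000"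
  · subst h2; simp [valueMap, PySem.Dict.getD_eq_get?_getD, PySem.Dict.get?_mk_cons]
  by_cases h3 : k = "$50,001 - $100,000"
  · subst h3; simp [valueMap, PySem.Dict.getD_eq_get?_getD, PySem.Dict.get?_mk_cons]
  by_cases h4 : k = "$100,001 - $250,000"
  · subst h4; simp [valueMap, PySem.Dict.getD_eq_get?_getD, PySem.Dict.get?_mk_cons]
  by_cases h5 : k = "$250,001 - $500,000"
  · subst h5; simp [valueMap, PySem.Dict.getD_eq_get?_getD, PySem.Dict.get?_mk_cons]
  by_cases h6 : k = "$500,001 - $1,000,000"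
  · subst h6; simp [valueMap, PySem.Dict.getD_eq_get?_getD, PySem.Dict.get?_mk_cons]
  by_cases h7 : k = "$1,000,001 - $5,000,000"
  · subst h7; simp [valueMap, PySem.Dict.getD_eq_get?_getD, PySem.Dict.get?_mk_cons]
  by_cases h8 : k = "$5,000,001 - $25,000,000"
  · subst h8; simp [valueMap, PySem.Dict.getD_eq_get?_getD, PySem.Dict.get?_mk_cons]
  by_cases h9 : k = "$25,000,001 - $50,000,000"
  · subst h9; simp [valueMap, PySem.Dict.getD_eq_get?_getD, PySem.Dict.get?_mk_cons]
  by_cases h10 : k = "Over $50,000,000"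
  · subst h10; simp [valueMap, PySem.Dict.getD_eq_get?_getD, PySem.Dict.get?_mk_cons]
  simp [valueMap, PySem.Dict.getD_eq_get?_getD, PySem.Dict.get?_mk_cons,
    h1, h2, h3, h4, h5, h6, h7, h8, h9, h10,
    Ne.symm h1, Ne.symm h2, Ne.symm h3, Ne.symm h4, Ne.symm h5,
    Ne.symm h6, Ne.symm h7, Ne.symm h8, Ne.symm h9, Ne.symm h10]
  rfl

theorem sumA_cons (k : String) (l : List String) :
    sumA (k :: l) = sumA l + valueMap.getD k 0 := by
  simp only [sumA, List.count_cons, beq_iff_eq]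
  push_cast
  rw [← hit k]
  ring

theorem sumA_eq (l : List String) :
    sumA l = (l.map (fun k => valueMap.getD k 0)).sum := by
  induction l with
  | nil => simp [sumA]
  | cons k t ih => rw [sumA_cons, ih, List.map_cons, List.sum_cons]; ring

theorem step_getD (d : PySem.Dict String Int) (k v : String) :
    (if d.contains k = false then d.insert k 1 else d.modify k 0 (· + 1)).getD v 0
      = d.getD v 0 + (if v = k then 1 else 0) := by
  by_cases hc : d.contains k = false
  · by_cases hv : v = k <;>
      simp [hc, hv, PySem.Dict.getD_insert, PySem.Dict.getD_of_not_contains d 0 hc]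
  · by_cases hv : v = k <;> simp [hc, hv, PySem.Dict.getD_modify]

theorem loop_getD (al : List (List (String × String))) (d : PySem.Dict String Int) (v : String) :
    (al.foldl (fun d a =>
        if d.contains (pyAmount a) = false then d.insert (pyAmount a) (1 : Int)
        else d.modify (pyAmount a) 0 (· + 1)) d).getD v 0
      = d.getD v 0 + ((al.map pyAmount).count v : Int) := by
  induction al generalizing d with
  | nil => simp
  | cons a t ih =>
    rw [List.foldl_cons, ih, step_getD]
    simp only [List.map_cons, List.count_cons, beq_iff_eq]
    by_cases h : v = pyAmount a <;> simp [h] <;> try ring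
    exact fun e => h e.symm

-- ===== VERDICT (by name: the statement is the Claim_ definition above) =====
theorem find_total_value_spec : Claim_equal_find_total_value := by
  intro al _ _
  unfold Spec_find_total_value find_total_value find_total_value_alt
  rw [PySem.List.foldl_add]
  have h := sumA_eq (al.map pyAmount)
  simp only [sumA, List.map_map, Function.comp_def] at h
  simp only [loop_getD, PySem.Dict.getD_empty]
  omega
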